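-- pv_equiv track=rewrite | github.com/vangaru/labs | DM labs/lab3/src/functions.py | get_all_edges_list
-- ===== SOURCE A (Python) =====
-- def get_all_edges_list(edges, vertexes):
-- 	all_edges_list = []
--
-- 	for i in range(len(vertexes)):
-- 		for j in range(len(vertexes)):
-- 			if (i + 1, j + 1) in edges:
-- 				all_edges_list.append( (i + 1, j + 1) )
--
-- 			else:
-- 				all_edges_list.append( () )
--
-- 	return all_edges_list
-- ===== SOURCE B (Python) =====
-- def get_all_edges_list(edges, vertexes):
--     V = len(vertexes)
--     result = [()] * (V * V)
--     for e in edges: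
--         a, b = e
--         if 1 <= a <= V and 1 <= b <= V:
--             result[(a - 1) * V + (b - 1)] = (a, b)
--     return result
-- ===== Notes on version B (the rewrite author's own statement) =====
-- stated objective: faster
-- what changed: Instead of scanning all V*V pairs and probing list membership in edges for each (O(V^2*E)), B prebuilds a table of V*V empty tuples and scatters each in-range edge into slot (a-1)*V+(b-1) in one pass over edges.
import Mathlib
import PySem

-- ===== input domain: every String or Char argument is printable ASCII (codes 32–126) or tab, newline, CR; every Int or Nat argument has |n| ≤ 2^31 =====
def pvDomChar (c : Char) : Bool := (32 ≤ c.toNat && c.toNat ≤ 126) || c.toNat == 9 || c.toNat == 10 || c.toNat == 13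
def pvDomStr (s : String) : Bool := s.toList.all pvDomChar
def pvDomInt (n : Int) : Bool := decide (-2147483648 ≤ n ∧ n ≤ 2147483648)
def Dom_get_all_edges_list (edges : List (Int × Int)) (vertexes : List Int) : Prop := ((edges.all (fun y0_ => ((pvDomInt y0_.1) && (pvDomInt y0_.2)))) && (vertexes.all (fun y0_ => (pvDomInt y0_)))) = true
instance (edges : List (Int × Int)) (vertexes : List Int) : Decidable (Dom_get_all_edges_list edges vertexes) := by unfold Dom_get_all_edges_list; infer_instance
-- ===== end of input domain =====

-- B scatters each in-range edge into a prebuilt V*V table of empty tuples in one pass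
-- over edges, instead of A's scan over all V*V pairs with a membership probe in edges (faster).


-- ===== PORT A =====
def get_all_edges_list (edges : List (Int × Int)) (vertexes : List Int) : List (List Int) :=
  (List.range vertexes.length).foldl (fun (all_edges_list : List (List Int)) (i : Nat) =>
    (List.range vertexes.length).foldl (fun (all_edges_list : List (List Int)) (j : Nat) =>
      if ((i : Int) + 1, (j : Int) + 1) ∈ edges then
        all_edges_list ++ [[(i : Int) + 1, (j : Int) + 1]]
      else
        all_edges_list ++ [[]]) all_edges_list) []

-- ===== PORT B =====
-- one scatter step of B's loop body: bounds-check the edge, then write it into its slot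
def pvStep (V : Nat) (res : List (List Int)) (e : Int × Int) : List (List Int) :=
  if 1 ≤ e.1 ∧ e.1 ≤ (V : Int) ∧ 1 ≤ e.2 ∧ e.2 ≤ (V : Int) then
    res.set ((e.1 - 1).toNat * V + (e.2 - 1).toNat) [e.1, e.2]
  else res

def get_all_edges_list_alt (edges : List (Int × Int)) (vertexes : List Int) : List (List Int) :=
  edges.foldl (pvStep vertexes.length) (List.replicate (vertexes.length * vertexes.length) [])

-- ===== PRECONDITION & SPEC =====
def Spec_get_all_edges_list (edges : List (Int × Int)) (vertexes : List Int) (out : List (List Int)) : Prop := out = get_all_edges_list_alt edges vertexes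
instance (edges : List (Int × Int)) (vertexes : List Int) (out : List (List Int)) : Decidable (Spec_get_all_edges_list edges vertexes out) := by unfold Spec_get_all_edges_list; infer_instance

-- ===== CLAIM (what is proved, stated in full; the proofs are below) =====
def Claim_equal_get_all_edges_list : Prop := ∀ (edges : List (Int × Int)) (vertexes : List Int), Dom_get_all_edges_list edges vertexes → Spec_get_all_edges_list edges vertexes (get_all_edges_list edges vertexes)

-- ===== LEMMAS AND PROOFS =====

-- the common table, entry by entry
def pvEntry (edges : List (Int × Int)) (i j : Nat) : List Int :=
  if ((i : Int) + 1, (j : Int) + 1) ∈ edges then [(i : Int) + 1, (j : Int) + 1] else []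

def pvSpecList (edges : List (Int × Int)) (V : Nat) : List (List Int) :=
  (List.range V).flatMap (fun i => (List.range V).map (fun j => pvEntry edges i j))

theorem pv_foldl_map {α β : Type} (l : List α) (g : α → β) (init : List β) :
    l.foldl (fun a x => a ++ [g x]) init = init ++ l.map g := by
  induction l generalizing init with
  | nil => simp
  | cons x l ih => simp [List.foldl_cons, ih]

theorem pv_foldl_app {α β : Type} (l : List α) (g : α → List β) (init : List β) :
    l.foldl (fun a x => a ++ g x) init = init ++ l.flatMap g := by
  induction l generalizing init with
  | nil => simp
  | cons x l ih => simp [List.foldl_cons, ih, List.append_assoc]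

theorem pvA_eq_spec (edges : List (Int × Int)) (vertexes : List Int) :
    get_all_edges_list edges vertexes = pvSpecList edges vertexes.length := by
  unfold get_all_edges_list pvSpecList
  have houter : (fun (all_edges_list : List (List Int)) (i : Nat) =>
      (List.range vertexes.length).foldl (fun (all_edges_list : List (List Int)) (j : Nat) =>
        if ((i : Int) + 1, (j : Int) + 1) ∈ edges then
          all_edges_list ++ [[(i : Int) + 1, (j : Int) + 1]]
        else all_edges_list ++ [[]]) all_edges_list)
      = fun (a : List (List Int)) (i : Nat) =>
          a ++ (List.range vertexes.length).map (fun j => pvEntry edges i j) := by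
    funext a i
    have hbody : (fun (a : List (List Int)) (j : Nat) =>
        if ((i : Int) + 1, (j : Int) + 1) ∈ edges then
          a ++ [[(i : Int) + 1, (j : Int) + 1]]
        else a ++ [[]])
        = fun (a : List (List Int)) (j : Nat) => a ++ [pvEntry edges i j] := by
      funext a j; unfold pvEntry; split <;> rfl
    rw [hbody, pv_foldl_map]
  rw [houter, pv_foldl_app]
  simp

theorem pv_idx_inj {V i j i' j' : Nat} (hj : j < V) (hj' : j' < V)
    (h : i * V + j = i' * V + j') : i = i' ∧ j = j' := by
  have hV : 0 < V := by omega
  have h1 : (V * i + j) / V = i := by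
    rw [Nat.mul_add_div hV, Nat.div_eq_of_lt hj]
    omega
  have h2 : (V * i' + j') / V = i' := by
    rw [Nat.mul_add_div hV, Nat.div_eq_of_lt hj']
    omega
  have h' : V * i + j = V * i' + j' := by
    rw [Nat.mul_comm V i, Nat.mul_comm V i']; exact h
  have hi : i = i' := by rw [← h1, ← h2, h']
  subst hi
  exact ⟨rfl, by omega⟩

theorem pv_step_length (V : Nat) (res : List (List Int)) (e : Int × Int) :
    (pvStep V res e).length = res.length := by
  unfold pvStep; split <;> simp

theorem pv_fold_length (es : List (Int × Int)) (V : Nat) (res : List (List Int)) :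
    (es.foldl (pvStep V) res).length = res.length := by
  induction es generalizing res with
  | nil => rfl
  | cons e es ih => rw [List.foldl_cons, ih, pv_step_length]

theorem pv_scatter_get (es : List (Int × Int)) (V : Nat) (res : List (List Int))
    (hlen : res.length = V * V) {i j : Nat} (hi : i < V) (hj : j < V) :
    (es.foldl (pvStep V) res).getD (i * V + j) []
      = if ((i : Int) + 1, (j : Int) + 1) ∈ es then [(i : Int) + 1, (j : Int) + 1]
        else res.getD (i * V + j) [] := by
  induction es generalizing res with
  | nil => simp
  | cons e es ih =>
    rw [List.foldl_cons, ih _ (by rw [pv_step_length]; exact hlen)]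
    by_cases hmem : ((i : Int) + 1, (j : Int) + 1) ∈ es
    · simp [hmem]
    · simp only [hmem, if_false]
      have hk : i * V + j < res.length := by
        rw [hlen]
        calc i * V + j < i * V + V := by omega
          _ = (i + 1) * V := by ring
          _ ≤ V * V := Nat.mul_le_mul_right V (by omega)
      by_cases he : e = ((i : Int) + 1, (j : Int) + 1)
      · subst he
        have hcond : (1 : Int) ≤ (i : Int) + 1 ∧ (i : Int) + 1 ≤ (V : Int) ∧
            (1 : Int) ≤ (j : Int) + 1 ∧ (j : Int) + 1 ≤ (V : Int) := by
          refine ⟨by omega, by omega, by omega, by omega⟩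
        have hidx : (((i : Int) + 1 - 1).toNat) * V + (((j : Int) + 1 - 1).toNat) = i * V + j := by
          have h1 : ((i : Int) + 1 - 1).toNat = i := by omega
          have h2 : ((j : Int) + 1 - 1).toNat = j := by omega
          rw [h1, h2]
        have : ((i : Int) + 1, (j : Int) + 1) ∈ ((i : Int) + 1, (j : Int) + 1) :: es :=
          List.mem_cons_self
        simp only [this, if_true]
        unfold pvStep
        simp only [hcond, and_self, if_true]
        rw [hidx, List.getD_eq_getElem?_getD, List.getElem?_set_self hk]
        rfl
      · have hne : ((i : Int) + 1, (j : Int) + 1) ∉ e :: es := by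
          intro hmem2
          rcases List.mem_cons.mp hmem2 with h | h
          · exact he h.symm
          · exact hmem h
        simp only [hne, if_false]
        unfold pvStep
        split
        · rename_i hcond
          have hia : (e.1 - 1).toNat < V := by omega
          have hjb : (e.2 - 1).toNat < V := by omega
          have hneidx : (e.1 - 1).toNat * V + (e.2 - 1).toNat ≠ i * V + j := by
            intro hEq
            obtain ⟨h1, h2⟩ := pv_idx_inj hjb hj hEq
            apply he
            have ha : e.1 = (i : Int) + 1 := by omega
            have hb : e.2 = (j : Int) + 1 := by omega
            obtain ⟨a, b⟩ := e
            simp_all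
          rw [List.getD_eq_getElem?_getD, List.getElem?_set_ne hneidx,
            ← List.getD_eq_getElem?_getD]
        · rfl

theorem pv_spec_length (edges : List (Int × Int)) (V : Nat) :
    (pvSpecList edges V).length = V * V := by
  unfold pvSpecList
  rw [List.length_flatMap]
  simp

theorem pv_flat_getD {α : Type} (l : List Nat) (g : Nat → List α) (V : Nat) (d : α)
    (hg : ∀ x, (g x).length = V) :
    ∀ (n : Nat), n < l.length → ∀ (j : Nat), j < V →
      (l.flatMap g).getD (n * V + j) d = (g (l.getD n 0)).getD j d := by
  induction l with
  | nil => intro n hn; simp at hn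
  | cons a l ih =>
    intro n hn j hj
    cases n with
    | zero =>
      simp only [List.flatMap_cons, Nat.zero_mul, Nat.zero_add]
      rw [List.getD_eq_getElem?_getD, List.getElem?_append_left (by rw [hg]; exact hj),
        ← List.getD_eq_getElem?_getD]
      rfl
    | succ n =>
      simp only [List.flatMap_cons]
      have harith : (n + 1) * V + j = (g a).length + (n * V + j) := by
        rw [hg]; ring
      rw [harith, List.getD_eq_getElem?_getD, List.getElem?_append_right (by omega)]
      have : (g a).length + (n * V + j) - (g a).length = n * V + j := by omega
      rw [this, ← List.getD_eq_getElem?_getD]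
      exact ih n (by simpa using hn) j hj

theorem pv_spec_getD (edges : List (Int × Int)) (V : Nat) {i j : Nat} (hi : i < V) (hj : j < V) :
    (pvSpecList edges V).getD (i * V + j) [] = pvEntry edges i j := by
  unfold pvSpecList
  rw [pv_flat_getD (List.range V) _ V [] (fun x => by simp) i (by simpa using hi) j hj]
  have hget : (List.range V).getD i 0 = i := by
    rw [List.getD_eq_getElem?_getD]
    simp [List.getElem?_range hi]
  rw [hget, List.getD_eq_getElem?_getD]
  have : j < ((List.range V).map (fun j => pvEntry edges i j)).length := by simpa using hj
  rw [List.getElem?_eq_getElem this]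
  simp

-- ===== VERDICT (by name: the statement is the Claim_ definition above) =====
theorem get_all_edges_list_spec : Claim_equal_get_all_edges_list := by
  intro edges vertexes _
  unfold Spec_get_all_edges_list get_all_edges_list_alt
  rw [pvA_eq_spec]
  set V := vertexes.length with hV
  have hlenS := pv_spec_length edges V
  have hlenB : (edges.foldl (pvStep V) (List.replicate (V * V) ([] : List Int))).length = V * V := by
    rw [pv_fold_length]; simp
  apply List.ext_getElem (by rw [hlenS, hlenB])
  intro k h1 h2
  have hk : k < V * V := by rw [← hlenS]; exact h1
  have hVpos : 0 < V := by
    rcases Nat.eq_zero_or_pos V with h0 | h0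
    · rw [h0] at hk; simp at hk
    · exact h0
  have hi : k / V < V := (Nat.div_lt_iff_lt_mul hVpos).mpr (by omega)
  have hj : k % V < V := Nat.mod_lt _ hVpos
  have hdec : k = (k / V) * V + k % V := by
    conv_lhs => rw [← Nat.div_add_mod k V]
    ring
  rw [← List.getD_eq_getElem _ [] h1, ← List.getD_eq_getElem _ [] h2, hdec]
  rw [pv_spec_getD edges V hi hj,
    pv_scatter_get edges V _ (by simp) hi hj]
  unfold pvEntry
  split
  · rfl
  · rw [List.getD_eq_getElem?_getD]
    have hlt : k / V * V + k % V < V * V := by omega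
    simp [hlt]
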